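-- pv_equiv track=rewrite | github.com/Kim-yongbeom/Algorithm | 프로그래머스/고득점/더 맵게.py | solution
-- ===== SOURCE A (Python) =====
-- def solution(scoville, K):
--     answer = 0
--     # [1,1,1] K:10 일때 인덱스 에러
--     # sum(scoville) > K 조건 추가로 해결
--     # [1,1,1] K:4 일때 return -1로 넘어가버림
--     # 시간초과
--     while True:
--         scoville.sort(reverse=True)
--         num = 0
--
--         if K > scoville[-1] and sum(scoville) > K:
--             answer += 1
--             num = scoville[-1] + (scoville[-2] * 2)
--             if K <= scoville[-2]:
--                 for i in range(1):
--                     scoville.pop()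
--             else:
--                 for i in range(2):
--                     scoville.pop()
--             scoville.append(num)
--
--         elif answer == 0:
--             return -1
--
--         else:
--             break
--     return answer
-- ===== SOURCE B (Python) =====
-- def solution(scoville, K):
--     # Sort once ascending, keep the list sorted by binary-search insertion of each mix,
--     # and track the running sum incrementally (A re-sorts and re-sums the whole list
--     # every iteration). Return value only: A mutates its argument in place, B does not.
--     arr = sorted(scoville)
--     total = sum(arr)
--     answer = 0
--     while True:
--         if not (arr[0] < K and total > K):
--             return answer if answer > 0 else -1
--         a, b = arr[0], arr[1]
--         answer += 1
--         if b >= K: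
--             # A keeps b, appends a + 2*b and stops on the next pass with this count
--             return answer
--         del arr[:2]
--         num = a + 2 * b
--         lo, hi = 0, len(arr)
--         while lo < hi:
--             mid = (lo + hi) // 2
--             if arr[mid] < num:
--                 lo = mid + 1
--             else:
--                 hi = mid
--         arr.insert(lo, num)
--         total += b
-- ===== Notes on version B (the rewrite author's own statement) =====
-- stated objective: alternative
-- what changed: B sorts once ascending and then maintains the sorted list by binary-search insertion of each new mix while tracking the sum incrementally and returning immediately in the keep-second-element case, instead of A's re-sorting and re-summing the whole list on every iteration of the while loop.
-- outside the precondition, e.g. on solution([-6, 4, 10], 3): A returns 2, B returns 1; on solution([10, 0, -5], -1): A does not finish within the time limit, B returns 1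
import Mathlib
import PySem

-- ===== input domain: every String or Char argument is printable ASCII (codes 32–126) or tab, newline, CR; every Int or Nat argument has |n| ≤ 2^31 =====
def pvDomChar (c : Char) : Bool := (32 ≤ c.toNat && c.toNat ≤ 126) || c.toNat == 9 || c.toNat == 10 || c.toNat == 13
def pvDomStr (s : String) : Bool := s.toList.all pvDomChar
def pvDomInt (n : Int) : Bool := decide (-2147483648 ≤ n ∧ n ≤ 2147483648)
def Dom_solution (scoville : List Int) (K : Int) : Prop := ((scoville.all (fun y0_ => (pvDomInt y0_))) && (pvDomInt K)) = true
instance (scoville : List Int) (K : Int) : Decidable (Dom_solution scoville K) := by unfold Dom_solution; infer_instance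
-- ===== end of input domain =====

-- B sorts once and maintains the sorted list by binary-search insertion with an incremental
-- sum, where A re-sorts and re-sums the whole working list on every iteration.
-- A mutates its argument in place (sort/pop/append), B does not: the equivalence proved here
-- is about the return value only.

-- ===== PORT A =====
-- The 'while True' loop is ported with fuel; under Pre_solution the loop runs at most
-- scoville.length + 1 iterations, so fuel scoville.length + 2 is never exhausted.
-- scoville[-1] / scoville[-2] are ported with pyGetD: under Pre_solution the list is
-- nonempty and index -2 is only read when the list has ≥ 2 elements, so both are in range.
def solutionLoop (fuel : Nat) (scoville : List Int) (K : Int) (answer : Int) : Int :=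
  match fuel with
  | 0 => 0    -- unreachable under Pre_solution
  | fuel + 1 =>
    let sc := PySem.List.sorted scoville (fun x => x) true     -- scoville.sort(reverse=True)
    if K > PySem.List.pyGetD sc (-1) 0 ∧ sc.sum > K then
      let answer := answer + 1
      let num := PySem.List.pyGetD sc (-1) 0 + PySem.List.pyGetD sc (-2) 0 * 2
      -- for i in range(1): scoville.pop()  /  for i in range(2): scoville.pop()
      let sc2 := if K ≤ PySem.List.pyGetD sc (-2) 0 then sc.dropLast else sc.dropLast.dropLast
      solutionLoop fuel (sc2 ++ [num]) K answer                -- scoville.append(num)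
    else if answer = 0 then (-1 : Int)
    else answer

def solution (scoville : List Int) (K : Int) : Int :=
  solutionLoop (scoville.length + 2) scoville K 0

-- ===== PORT B =====
-- hand-written binary search of Source B (the lo/hi while loop), with the same fuel convention as
-- the main loops: hi - lo bounds the iteration count, so fuel hi - lo is never exhausted.
-- Every call has 0 ≤ mid < arr.length, so plain getD is exact for arr[mid].
def bsearchPos (arr : List Int) (num : Int) (fuel : Nat) (lo hi : Nat) : Nat :=
  match fuel with
  | 0 => lo    -- unreachable: the gap hi - lo shrinks every iteration
  | fuel + 1 =>
    if lo < hi then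
      let mid := (lo + hi) / 2
      if arr.getD mid 0 < num then bsearchPos arr num fuel (mid + 1) hi
      else bsearchPos arr num fuel lo mid
    else lo

-- the 'while True' loop of Source B, with the same fuel convention as port A
def solutionAltLoop (fuel : Nat) (arr : List Int) (K : Int) (total : Int) (answer : Int) : Int :=
  match fuel with
  | 0 => 0    -- unreachable under Pre_solution
  | fuel + 1 =>
    if PySem.List.pyGetD arr 0 0 < K ∧ total > K then          -- arr[0] < K and total > K
      let a := PySem.List.pyGetD arr 0 0
      let b := PySem.List.pyGetD arr 1 0
      let answer := answer + 1
      if b ≥ K then answer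
      else
        let arr2 := arr.drop 2                                 -- del arr[:2]
        let num := a + 2 * b
        let lo := bsearchPos arr2 num arr2.length 0 arr2.length
        solutionAltLoop fuel (PySem.List.insert arr2 (lo : Int) num) K (total + b) answer
    else if answer > 0 then answer else (-1 : Int)

def solution_alt (scoville : List Int) (K : Int) : Int :=
  let arr := PySem.List.sorted scoville (fun x => x)
  solutionAltLoop (scoville.length + 2) arr K arr.sum 0

-- ===== PRECONDITION & SPEC =====
-- Pre_ excludes the empty list (A raises IndexError) and lists containing a negative scoville
-- value, which are outside the problem's domain: there A can loop forever (e.g. [10, 0, -5]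
-- with K = -1) and where it does return, its value can count extra mixes that are accidents
-- of its re-sort loop (e.g. [-6, 4, 10] with K = 3).
def Pre_solution (scoville : List Int) (K : Int) : Prop :=
  scoville ≠ [] ∧ (∀ x ∈ scoville, 0 ≤ x)
instance (scoville : List Int) (K : Int) : Decidable (Pre_solution scoville K) := by
  unfold Pre_solution; infer_instance

def pvWitness_solution : List Int × Int := ([1, 2, 3, 9, 10, 12], 7)

def Spec_solution (scoville : List Int) (K : Int) (out : Int) : Prop := out = solution_alt scoville K
instance (scoville : List Int) (K : Int) (out : Int) : Decidable (Spec_solution scoville K out) := by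
  unfold Spec_solution; infer_instance

-- ===== CLAIM (what is proved, stated in full; the proofs are below) =====
def Claim_equal_solution : Prop := ∀ (scoville : List Int) (K : Int), Dom_solution scoville K → Pre_solution scoville K → Spec_solution scoville K (solution scoville K)

-- ===== LEMMAS AND PROOFS =====

-- descending sort of an Int list is the reverse of the ascending sort
lemma sortedDesc_eq_reverse (xs : List Int) :
    PySem.List.sorted xs (fun x => x) true = (PySem.List.sorted xs (fun x => x)).reverse := by
  apply PySem.List.eq_of_perm_of_pairwise_le_of_injective (key := fun x : Int => -x) neg_injective
  · exact (PySem.List.sorted_perm xs (fun x => x) true).trans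
      ((PySem.List.sorted_perm xs (fun x => x) false).symm.trans (List.reverse_perm _).symm)
  · exact (PySem.List.sorted_pairwise_rev xs (fun x => x)).imp (fun h => by simpa using h)
  · rw [List.pairwise_reverse]
    exact (PySem.List.sorted_pairwise xs (fun x => x)).imp (fun h => by simpa using h)

lemma sorted_getD_mono (arr : List Int) (hs : arr.Pairwise (· ≤ ·)) (i j : Nat)
    (hij : i ≤ j) (hj : j < arr.length) : arr.getD i 0 ≤ arr.getD j 0 := by
  rcases Nat.eq_or_lt_of_le hij with rfl | h
  · exact le_refl _
  · rw [List.getD_eq_getElem _ _ (lt_trans h hj), List.getD_eq_getElem _ _ hj]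
    exact List.pairwise_iff_getElem.mp hs i j (lt_trans h hj) hj h

-- the loop invariant of Source B's binary search
lemma bsearchPos_spec (arr : List Int) (num : Int) (hs : arr.Pairwise (· ≤ ·)) :
    ∀ n lo hi, hi - lo ≤ n → lo ≤ hi → hi ≤ arr.length →
      (∀ i, i < lo → arr.getD i 0 < num) →
      (∀ i, hi ≤ i → i < arr.length → num ≤ arr.getD i 0) →
      lo ≤ bsearchPos arr num n lo hi ∧ bsearchPos arr num n lo hi ≤ hi ∧
      (∀ i, i < bsearchPos arr num n lo hi → arr.getD i 0 < num) ∧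
      (∀ i, bsearchPos arr num n lo hi ≤ i → i < arr.length → num ≤ arr.getD i 0) := by
  intro n
  induction n with
  | zero =>
    intro lo hi hn hlh hhl hlow hhigh
    have : lo = hi := by omega
    subst this
    exact ⟨le_refl _, le_refl _, hlow, hhigh⟩
  | succ n ih =>
    intro lo hi hn hlh hhl hlow hhigh
    by_cases hlt : lo < hi
    · rw [bsearchPos, if_pos hlt]
      simp only []
      set mid := (lo + hi) / 2 with hmid
      by_cases hc : arr.getD mid 0 < num
      · rw [if_pos hc]
        have := ih (mid + 1) hi (by omega) (by omega) hhl
          (fun i hi' =>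
            lt_of_le_of_lt (sorted_getD_mono arr hs i mid (by omega) (by omega)) hc)
          hhigh
        exact ⟨by omega, this.2.1, this.2.2.1, this.2.2.2⟩
      · rw [if_neg hc]
        push Not at hc
        have := ih lo mid (by omega) (by omega) (by omega) hlow
          (fun i hi' hil => le_trans hc (sorted_getD_mono arr hs mid i hi' hil))
        exact ⟨this.1, by omega, this.2.2.1, this.2.2.2⟩
    · rw [bsearchPos, if_neg hlt]
      have : lo = hi := by omega
      subst this
      exact ⟨le_refl _, le_refl _, hlow, hhigh⟩

lemma take_getD_lt (arr : List Int) (num : Int) (p : Nat)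
    (hlt : ∀ i, i < p → arr.getD i 0 < num) :
    ∀ a ∈ arr.take p, a < num := by
  intro a ha
  obtain ⟨j, hj, rfl⟩ := List.mem_iff_getElem.mp ha
  have hjp : j < p := by simp [List.length_take] at hj; omega
  have hjl : j < arr.length := by simp [List.length_take] at hj; omega
  have := hlt j hjp
  rw [List.getD_eq_getElem _ _ hjl] at this
  simpa [List.getElem_take] using this

lemma drop_getD_ge (arr : List Int) (num : Int) (p : Nat)
    (hge : ∀ i, p ≤ i → i < arr.length → num ≤ arr.getD i 0) :
    ∀ b ∈ arr.drop p, num ≤ b := by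
  intro b hb
  obtain ⟨j, hj, rfl⟩ := List.mem_iff_getElem.mp hb
  have hlen : j < arr.length - p := by simpa using hj
  have := hge (p + j) (by omega) (by omega)
  rw [List.getD_eq_getElem _ _ (by omega)] at this
  simpa [List.getElem_drop] using this

-- inserting at the binary-search position keeps the list sorted
lemma insert_pos_sorted (arr : List Int) (num : Int) (p : Nat)
    (hs : arr.Pairwise (· ≤ ·))
    (hlt : ∀ i, i < p → arr.getD i 0 < num)
    (hge : ∀ i, p ≤ i → i < arr.length → num ≤ arr.getD i 0) :
    (arr.take p ++ num :: arr.drop p).Pairwise (· ≤ ·) := by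
  rw [List.pairwise_append]
  refine ⟨hs.sublist (List.take_sublist _ _), ?_, ?_⟩
  · rw [List.pairwise_cons]
    exact ⟨drop_getD_ge arr num p hge, hs.sublist (List.drop_sublist _ _)⟩
  · intro a ha b hb
    have ha' := take_getD_lt arr num p hlt a ha
    rcases List.mem_cons.mp hb with rfl | hb'
    · exact le_of_lt ha'
    · exact le_of_lt (lt_of_lt_of_le ha' (drop_getD_ge arr num p hge b hb'))

-- scoville[-2] on a list of the shape xs ++ [x, y] reads x
lemma pyGetD_neg_two_append_pair (xs : List Int) (x y d : Int) :
    PySem.List.pyGetD (xs ++ [x, y]) (-2) d = x := by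
  rw [PySem.List.pyGetD_neg_ofNat _ 2 d (by omega) (by simp)]
  have hl2 : (xs ++ [x, y]).length - 2 = xs.length := by simp
  simp only [hl2]
  rw [List.getElem_append_right (le_refl _)]
  simp

-- A's loop returns `answer` at once when every element is already ≥ K
lemma solutionLoop_terminal (f : Nat) (sc : List Int) (K ans : Int)
    (hne : sc ≠ []) (hge : ∀ x ∈ sc, K ≤ x) (hans : ans ≠ 0) :
    solutionLoop (f + 1) sc K ans = ans := by
  have hs : PySem.List.sorted sc (fun x => x) true ≠ [] := by
    rw [Ne, PySem.List.sorted_eq_nil_iff]; exact hne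
  rw [solutionLoop]
  rw [PySem.List.pyGetD_neg_one _ _ hs]
  have hmem : (PySem.List.sorted sc (fun x => x) true).getLast hs ∈ sc := by
    rw [← PySem.List.mem_sorted (key := fun x => x) (rev := true)]
    exact List.getLast_mem hs
  rw [if_neg (by simp only [not_and]; intro h; exact absurd h (not_lt.mpr (hge _ hmem)))]
  rw [if_neg hans]

-- the coupling: A's re-sorted working list vs B's sorted list + running sum
lemma loop_eq (K : Int) :
    ∀ fA : Nat, ∀ fB : Nat, ∀ sc arr : List Int, ∀ total ans : Int,
      arr.Perm sc → arr.Pairwise (· ≤ ·) → total = arr.sum →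
      (∀ x ∈ arr, 0 ≤ x) → arr ≠ [] → 0 ≤ ans →
      sc.length + 1 ≤ fA → arr.length + 1 ≤ fB →
      solutionLoop fA sc K ans = solutionAltLoop fB arr K total ans := by
  intro fA
  induction fA using Nat.strong_induction_on with
  | _ fA ih =>
  intro fB sc arr total ans hperm hsort htot hnn hne hans hfA hfB
  obtain ⟨fA', rfl⟩ : ∃ m, fA = m + 1 := ⟨fA - 1, by omega⟩
  obtain ⟨fB', rfl⟩ : ∃ m, fB = m + 1 := ⟨fB - 1, by omega⟩
  obtain ⟨a, t, rfl⟩ : ∃ a t, arr = a :: t := by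
    cases arr with
    | nil => exact absurd rfl hne
    | cons a t => exact ⟨a, t, rfl⟩
  have hlen : sc.length = t.length + 1 := by
    have := hperm.length_eq; simpa using this.symm
  have hdesc : PySem.List.sorted sc (fun x => x) true = (a :: t).reverse := by
    rw [sortedDesc_eq_reverse, PySem.List.sorted_id_eq_of_perm_of_pairwise sc (a :: t) hperm hsort]
  rw [solutionLoop, solutionAltLoop, hdesc]
  simp only []
  have h1 : PySem.List.pyGetD ((a :: t).reverse) (-1) 0 = a := by
    rw [List.reverse_cons]
    exact PySem.List.pyGetD_neg_one_append_singleton t.reverse a 0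
  rw [h1, List.sum_reverse, PySem.List.pyGetD_zero_cons, htot]
  by_cases hg : a < K ∧ (a :: t).sum > K
  · rw [if_pos (by exact ⟨hg.1, hg.2⟩), if_pos hg]
    obtain ⟨haK, hsK⟩ := hg
    obtain ⟨b, r, rfl⟩ : ∃ b r, t = b :: r := by
      cases t with
      | nil => exfalso; simp at hsK; omega
      | cons b r => exact ⟨b, r, rfl⟩
    have hrev : (a :: b :: r).reverse = r.reverse ++ [b, a] := by simp
    have h2 : PySem.List.pyGetD ((a :: b :: r).reverse) (-2) 0 = b := by
      rw [hrev]
      exact pyGetD_neg_two_append_pair r.reverse b a 0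
    have h3 : PySem.List.pyGetD (a :: b :: r) 1 0 = b := by
      rw [show (1 : Int) = ((1 : Nat) : Int) by norm_num, PySem.List.pyGetD_natCast]
      rfl
    rw [h2, h3]
    have ha0 : 0 ≤ a := hnn a (by simp)
    have hb0 : 0 ≤ b := hnn b (by simp)
    have hbr : ∀ x ∈ r, b ≤ x := by
      rw [List.pairwise_cons] at hsort
      have := hsort.2
      rw [List.pairwise_cons] at this
      exact this.1
    by_cases hb : K ≤ b
    · rw [if_pos hb, if_pos (by exact hb)]
      have hdl : ((a :: b :: r).reverse).dropLast = (b :: r).reverse := by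
        rw [List.reverse_cons]; exact List.dropLast_concat ..
      rw [hdl]
      obtain ⟨f'', rfl⟩ : ∃ m, fA' = m + 1 := ⟨fA' - 1, by simp at hlen; omega⟩
      apply solutionLoop_terminal
      · simp
      · intro x hx
        rcases List.mem_append.mp hx with hx | hx
        · rw [List.mem_reverse] at hx
          rcases List.mem_cons.mp hx with rfl | hx
          · exact hb
          · exact le_trans hb (hbr x hx)
        · have : x = a + b * 2 := by simpa using hx
          omega
      · omega
    · rw [if_neg hb, if_neg (by exact hb)]
      have hdl2 : ((a :: b :: r).reverse).dropLast.dropLast = r.reverse := by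
        rw [List.reverse_cons, List.dropLast_concat, List.reverse_cons, List.dropLast_concat]
      rw [hdl2]
      have hsr : r.Pairwise (· ≤ ·) := by
        rw [List.pairwise_cons] at hsort
        exact (List.pairwise_cons.mp hsort.2).2
      have hdrop : (a :: b :: r).drop 2 = r := rfl
      rw [hdrop]
      set num := a + 2 * b with hnumdef
      set p := bsearchPos r num r.length 0 r.length with hpdef
      have hspec := bsearchPos_spec r num hsr r.length 0 r.length (by omega) (by omega)
        (le_refl _) (fun i h => absurd h (Nat.not_lt_zero i))
        (fun i h1 h2 => absurd (lt_of_le_of_lt h1 h2) (lt_irrefl _))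
      obtain ⟨-, hple, hplt, hpge⟩ := hspec
      have hins : PySem.List.insert r ((p : Nat) : Int) num = r.take p ++ num :: r.drop p :=
        PySem.List.insert_natCast r p num hple
      rw [hins]
      have hpermIns : (r.take p ++ num :: r.drop p).Perm (r.reverse ++ [num]) := by
        refine List.perm_middle.trans ?_
        rw [List.take_append_drop]
        exact (List.perm_append_singleton num r).symm.trans
          (((List.reverse_perm r).symm).append_right [num])
      have hsumr : (r.take p ++ num :: r.drop p).sum = num + r.sum := by
        rw [hpermIns.sum_eq]; simp [add_comm]
      rw [show a + b * 2 = num by omega]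
      apply ih fA' (by omega) fB' _ _ _ _ hpermIns.symm.symm
      · exact insert_pos_sorted r num p hsr hplt hpge
      · rw [hsumr]
        have : (a :: b :: r).sum = a + b + r.sum := by simp; ring
        omega
      · intro x hx
        have hx' : x = num ∨ x ∈ r := by
          have := hpermIns.mem_iff.mp hx
          rcases List.mem_append.mp this with h | h
          · exact Or.inr (List.mem_reverse.mp h)
          · exact Or.inl (by simpa using h)
        rcases hx' with rfl | hx'
        · omega
        · exact hnn x (by simp [hx'])
      · simp
      · omega
      · have : (r.reverse ++ [num]).length = r.length + 1 := by simp
        rw [this]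
        simp at hlen
        omega
      · have : (r.take p ++ num :: r.drop p).length = r.length + 1 := by
          rw [hpermIns.length_eq]; simp
        rw [this]
        simp at hfB
        omega
  · rw [if_neg (by exact hg), if_neg hg]
    split_ifs <;> omega

-- ===== VERDICT (by name: the statement is the Claim_ definition above) =====
theorem solution_spec : Claim_equal_solution := by
  intro scoville K _ hPre
  obtain ⟨hne, hnn⟩ := hPre
  unfold Spec_solution solution solution_alt
  apply loop_eq K _ _ scoville _ _ 0 (PySem.List.sorted_perm _ _ _)
  · exact PySem.List.sorted_pairwise scoville (fun x => x)
  · rfl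
  · intro x hx
    exact hnn x ((PySem.List.mem_sorted _ _ _ _).mp hx)
  · rw [Ne, PySem.List.sorted_eq_nil_iff]; exact hne
  · exact le_refl 0
  · omega
  · rw [PySem.List.length_sorted]
    omega
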